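-- pv_equiv track=rewrite | github.com/kazuhiko1979/edabit | 116_very_hard_The_Complete_Bracelet.py | complete_bracelet
-- ===== SOURCE A (Python) =====
-- def complete_bracelet(lst):
--
--   a = []
--   for x, i in enumerate(lst[:-1]):
--     a.append(i)
--     b = len(lst) // len(a)
--     if b * a == lst and len(a) >= 2:
--       return True
--   return False
-- ===== SOURCE B (Python) =====
-- def _periodic(lst, n, k):
--     return all(lst[i] == lst[i % k] for i in range(k, n))
--
-- def complete_bracelet(lst):
--     n = len(lst)
--     d = 2
--     while d * d <= n:
--         if n % d == 0:
--             if _periodic(lst, n, d) or _periodic(lst, n, n // d):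
--                 return True
--         d += 1
--     return False
-- ===== Notes on version B (the rewrite author's own statement) =====
-- stated objective: faster
-- what changed: A copies and compares a repeated prefix for every prefix length 1..n-1 (O(n^2)); B enumerates divisor pairs (d, n//d) only up to sqrt(n) and tests each candidate period in place with lst[i] == lst[i % k], with no list building.
import Mathlib
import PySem

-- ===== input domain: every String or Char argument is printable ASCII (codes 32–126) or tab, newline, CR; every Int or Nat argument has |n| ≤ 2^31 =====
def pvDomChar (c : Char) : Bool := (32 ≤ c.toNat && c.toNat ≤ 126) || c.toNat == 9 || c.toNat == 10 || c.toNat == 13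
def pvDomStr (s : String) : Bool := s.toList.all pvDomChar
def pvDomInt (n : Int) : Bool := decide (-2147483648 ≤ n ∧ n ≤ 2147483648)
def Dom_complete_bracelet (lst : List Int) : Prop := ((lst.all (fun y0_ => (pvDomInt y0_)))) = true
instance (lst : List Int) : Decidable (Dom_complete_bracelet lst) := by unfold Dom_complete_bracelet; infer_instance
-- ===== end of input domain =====

-- B replaces A's full O(n^2) prefix scan (building each prefix and comparing its repetition with the
-- whole list) by a sqrt-bounded divisor-pair scan with an in-place modular periodicity test; same
-- return value on every input.

-- ===== PORT A =====
-- the for-loop over enumerate(lst[:-1]) with early return; a = accumulated prefix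
def cbA_loop (lst : List Int) : List Int → List (Int × Int) → Bool
  | _, [] => false
  | a, (_, i) :: rest =>
    let a' := a ++ [i]
    let b := PySem.Int.floordiv (lst.length : Int) (a'.length : Int)
    if (PySem.List.pyRepeat a' b == lst) && decide (2 ≤ a'.length) then true
    else cbA_loop lst a' rest

def complete_bracelet (lst : List Int) : Bool :=
  cbA_loop lst [] (PySem.List.enumerate (PySem.List.slice lst none (some (-1))) 0)

-- ===== PORT B =====
-- all(lst[i] == lst[i % k] for i in range(k, n)); indices are always in range, so pyGet? never misses
def cbB_periodic (lst : List Int) (n k : Int) : Bool :=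
  (PySem.List.pyRange k n 1).all (fun i =>
    PySem.List.pyGet? lst i == PySem.List.pyGet? lst (PySem.Int.mod i k))

-- the while d * d <= n loop of Source B
def cbB_loop (lst : List Int) (n d : Int) : Bool :=
  if h : d * d ≤ n then
    (if PySem.Int.mod n d == 0 then
      cbB_periodic lst n d || cbB_periodic lst n (PySem.Int.floordiv n d)
     else false)
    || cbB_loop lst n (d + 1)
  else false
termination_by (n + 1 - d).toNat
decreasing_by
  have hd : d ≤ n := by nlinarith [sq_nonneg (d - 1), sq_nonneg d]
  omega

def complete_bracelet_alt (lst : List Int) : Bool :=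
  cbB_loop lst (lst.length : Int) 2

-- ===== PRECONDITION & SPEC =====
def Spec_complete_bracelet (lst : List Int) (out : Bool) : Prop := out = complete_bracelet_alt lst
instance (lst : List Int) (out : Bool) : Decidable (Spec_complete_bracelet lst out) := by unfold Spec_complete_bracelet; infer_instance

-- ===== CLAIM (what is proved, stated in full; the proofs are below) =====
def Claim_equal_complete_bracelet : Prop := ∀ (lst : List Int), Dom_complete_bracelet lst → Spec_complete_bracelet lst (complete_bracelet lst)

-- ===== LEMMAS AND PROOFS =====

-- lst is periodic with (candidate) period k, phrased through getElem?
def Per (lst : List Int) (k : Nat) : Prop := ∀ i, i < lst.length → lst[i]? = lst[i % k]?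

-- what A's loop tests for one accumulated prefix a'
def CheckA (lst a' : List Int) : Prop :=
  PySem.List.pyRepeat a' (PySem.Int.floordiv (lst.length : Int) (a'.length : Int)) = lst ∧ 2 ≤ a'.length

-- abstract meaning of the two programs
def ASpec (lst : List Int) : Prop :=
  ∃ k, 2 ≤ k ∧ k < lst.length ∧ k ∣ lst.length ∧ Per lst k
def BSpec (lst : List Int) : Prop :=
  ∃ e, 2 ≤ e ∧ e * e ≤ lst.length ∧ e ∣ lst.length ∧ (Per lst e ∨ Per lst (lst.length / e))

lemma flat_rep_length {α : Type} (m : Nat) (xs : List α) :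
    ((List.replicate m xs).flatten).length = m * xs.length := by
  induction m with
  | zero => simp
  | succ m ih => simp [List.replicate_succ, ih]; ring

lemma flat_rep_getElem? {α : Type} (m : Nat) (xs : List α) (i : Nat)
    (_h0 : 0 < xs.length) (hi : i < m * xs.length) :
    ((List.replicate m xs).flatten)[i]? = xs[i % xs.length]? := by
  induction m generalizing i with
  | zero => omega
  | succ m ih =>
    have hsm : (m + 1) * xs.length = m * xs.length + xs.length := by ring
    rw [List.replicate_succ, List.flatten_cons]
    by_cases hlt : i < xs.length
    · rw [List.getElem?_append_left hlt, Nat.mod_eq_of_lt hlt]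
    · rw [List.getElem?_append_right (by omega)]
      rw [ih (i - xs.length) (by omega)]
      congr 1
      conv_rhs => rw [show i = (i - xs.length) + xs.length by omega]
      rw [Nat.add_mod_right]

lemma rep_eq_iff (lst : List Int) (k : Nat) (hk : 0 < k) (hkn : k < lst.length) :
    (List.replicate (lst.length / k) (lst.take k)).flatten = lst ↔
      (k ∣ lst.length ∧ Per lst k) := by
  have hlen : (lst.take k).length = k := by simp; omega
  have hflen : ((List.replicate (lst.length / k) (lst.take k)).flatten).length
      = (lst.length / k) * k := by rw [flat_rep_length, hlen]
  constructor
  · intro h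
    have hl : (lst.length / k) * k = lst.length := by
      have := congrArg List.length h
      rwa [hflen] at this
    have hdvd : k ∣ lst.length := ⟨lst.length / k, ((Nat.mul_comm k (lst.length / k)).trans hl).symm⟩
    refine ⟨hdvd, fun i hi => ?_⟩
    conv_lhs => rw [← h]
    rw [flat_rep_getElem? _ _ i (by omega) (by rw [hlen]; omega), hlen,
      List.getElem?_take_of_lt (Nat.mod_lt i hk)]
  · rintro ⟨hdvd, hper⟩
    have hl : (lst.length / k) * k = lst.length := Nat.div_mul_cancel hdvd
    apply List.ext_getElem?
    intro i
    by_cases hi : i < lst.length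
    · rw [flat_rep_getElem? _ _ i (by omega) (by rw [hlen]; omega), hlen,
        List.getElem?_take_of_lt (Nat.mod_lt i hk), ← hper i hi]
    · rw [List.getElem?_eq_none (l := lst) (by omega),
        List.getElem?_eq_none (by rw [hflen]; omega)]

lemma loopA_iff (lst : List Int) (l : List (Int × Int)) (a : List Int) :
    cbA_loop lst a l = true ↔
      ∃ j, j < l.length ∧ CheckA lst (a ++ (l.take (j + 1)).map (·.2)) := by
  induction l generalizing a with
  | nil => simp [cbA_loop]
  | cons p rest ih =>
    obtain ⟨x, i⟩ := p
    rw [cbA_loop]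
    by_cases hb : (PySem.List.pyRepeat (a ++ [i])
        (PySem.Int.floordiv (lst.length : Int) ((a ++ [i]).length : Int)) == lst
        && decide (2 ≤ (a ++ [i]).length)) = true
    · rw [if_pos hb]
      have hc : CheckA lst (a ++ [i]) := by
        simp only [Bool.and_eq_true, beq_iff_eq, decide_eq_true_eq] at hb
        exact ⟨hb.1, hb.2⟩
      simp only [true_iff]
      refine ⟨0, by simp, ?_⟩
      simp only [List.take_succ_cons, List.take_zero, List.map_cons, List.map_nil]
      exact hc
    · rw [if_neg hb, ih]
      have hc : ¬ CheckA lst (a ++ [i]) := fun h => hb (by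
        simp only [Bool.and_eq_true, beq_iff_eq, decide_eq_true_eq]
        exact ⟨h.1, h.2⟩)
      constructor
      · rintro ⟨j, hj, hcj⟩
        refine ⟨j + 1, by simp only [List.length_cons]; omega, ?_⟩
        simp only [List.take_succ_cons, List.map_cons]
        rw [List.append_cons]
        exact hcj
      · rintro ⟨j, hj, hcj⟩
        cases j with
        | zero =>
          simp only [List.take_succ_cons, List.take_zero, List.map_cons, List.map_nil] at hcj
          exact absurd hcj hc
        | succ j =>
          refine ⟨j, by simp only [List.length_cons] at hj; omega, ?_⟩
          simp only [List.take_succ_cons, List.map_cons] at hcj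
          rw [List.append_cons] at hcj
          exact hcj

lemma A_iff (lst : List Int) : complete_bracelet lst = true ↔ ASpec lst := by
  rw [complete_bracelet, PySem.List.slice_to_neg_one, loopA_iff]
  constructor
  · rintro ⟨j, hj, hcj⟩
    simp only [PySem.List.length_enumerate, List.length_dropLast] at hj
    set k := j + 1 with hk
    have htk : ((PySem.List.enumerate lst.dropLast 0).take k).map (·.2) = lst.take k := by
      rw [List.map_take, PySem.List.map_snd_enumerate, List.dropLast_eq_take,
        List.take_take]
      congr 1; omega
    rw [List.nil_append, htk] at hcj
    obtain ⟨heq, hlen2⟩ := hcj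
    have hklen : (lst.take k).length = k := by simp; omega
    have hk2 : 2 ≤ k := by omega
    have hrw : PySem.Int.floordiv (lst.length : Int) (((lst.take k).length : Nat) : Int)
        = ((lst.length / k : Nat) : Int) := by
      rw [hklen]; exact PySem.Int.floordiv_natCast _ _
    rw [PySem.List.pyRepeat, hrw] at heq
    simp only [Int.toNat_natCast] at heq
    have := (rep_eq_iff lst k (by omega) (by omega)).mp heq
    exact ⟨k, hk2, by omega, this.1, this.2⟩
  · rintro ⟨k, hk2, hkn, hdvd, hper⟩
    refine ⟨k - 1, ?_, ?_⟩
    · simp only [PySem.List.length_enumerate, List.length_dropLast]; omega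
    · have hk : k - 1 + 1 = k := by omega
      rw [hk, List.nil_append]
      have htk : ((PySem.List.enumerate lst.dropLast 0).take k).map (·.2) = lst.take k := by
        rw [List.map_take, PySem.List.map_snd_enumerate, List.dropLast_eq_take,
          List.take_take]
        congr 1; omega
      rw [htk]
      have hklen : (lst.take k).length = k := by simp; omega
      refine ⟨?_, by omega⟩
      have hrw : PySem.Int.floordiv (lst.length : Int) (((lst.take k).length : Nat) : Int)
          = ((lst.length / k : Nat) : Int) := by
        rw [hklen]; exact PySem.Int.floordiv_natCast _ _
      rw [PySem.List.pyRepeat, hrw]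
      simp only [Int.toNat_natCast]
      exact (rep_eq_iff lst k (by omega) (by omega)).mpr ⟨hdvd, hper⟩

lemma periodic_iff (lst : List Int) (k : Nat) (_hk : 0 < k) (_hkn : k ≤ lst.length) :
    cbB_periodic lst (lst.length : Int) (k : Int) = true ↔ Per lst k := by
  rw [cbB_periodic, List.all_eq_true]
  constructor
  · intro h i hi
    by_cases hik : i < k
    · rw [Nat.mod_eq_of_lt hik]
    · have hmem : (i : Int) ∈ PySem.List.pyRange (k : Int) (lst.length : Int) 1 := by
        rw [PySem.List.mem_pyRange_one]
        exact ⟨by exact_mod_cast Nat.le_of_not_lt hik, by exact_mod_cast hi⟩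
      have := h _ hmem
      simp only [beq_iff_eq] at this
      rw [PySem.Int.mod_natCast, PySem.List.pyGet?_natCast, PySem.List.pyGet?_natCast] at this
      exact this
  · intro hper x hx
    rw [PySem.List.mem_pyRange_one] at hx
    obtain ⟨hx1, hx2⟩ := hx
    have hx0 : 0 ≤ x := le_trans (by exact_mod_cast Nat.zero_le k) hx1
    obtain ⟨i, rfl⟩ := Int.eq_ofNat_of_zero_le hx0
    simp only [beq_iff_eq]
    rw [PySem.Int.mod_natCast, PySem.List.pyGet?_natCast, PySem.List.pyGet?_natCast]
    exact hper i (by exact_mod_cast hx2)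

lemma loopB_iff (lst : List Int) (d : Int) (hd : 2 ≤ d) :
    cbB_loop lst (lst.length : Int) d = true ↔
      ∃ e : Int, d ≤ e ∧ e * e ≤ (lst.length : Int) ∧ PySem.Int.mod (lst.length : Int) e = 0 ∧
        (cbB_periodic lst (lst.length : Int) e = true ∨
         cbB_periodic lst (lst.length : Int) (PySem.Int.floordiv (lst.length : Int) e) = true) := by
  by_cases h : d * d ≤ (lst.length : Int)
  · rw [cbB_loop, dif_pos h, Bool.or_eq_true, loopB_iff lst (d + 1) (by omega)]
    constructor
    · rintro (hinner | ⟨e, he1, he2, he3, he4⟩)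
      · refine ⟨d, le_refl d, h, ?_⟩
        by_cases hm : PySem.Int.mod (lst.length : Int) d == 0
        · rw [if_pos hm, Bool.or_eq_true] at hinner
          exact ⟨by simpa using hm, hinner⟩
        · rw [if_neg hm] at hinner; exact absurd hinner (by simp)
      · exact ⟨e, by omega, he2, he3, he4⟩
    · rintro ⟨e, he1, he2, he3, he4⟩
      by_cases hed : e = d
      · subst hed
        left
        rw [if_pos (by simpa using he3), Bool.or_eq_true]
        exact he4
      · right; exact ⟨e, by omega, he2, he3, he4⟩
  · rw [cbB_loop, dif_neg h]
    constructor
    · intro hf; exact absurd hf Bool.false_ne_true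
    · rintro ⟨e, he1, he2, _⟩
      exfalso
      have : d * d ≤ e * e :=
        mul_le_mul he1 he1 (by omega) (by omega)
      omega
termination_by ((lst.length : Int) + 1 - d).toNat
decreasing_by
  have hdn : d ≤ (lst.length : Int) := by nlinarith [sq_nonneg (d - 1)]
  omega

lemma B_iff (lst : List Int) : complete_bracelet_alt lst = true ↔ BSpec lst := by
  rw [complete_bracelet_alt, loopB_iff lst 2 (by omega)]
  constructor
  · rintro ⟨e, he1, he2, he3, he4⟩
    have he0 : 0 ≤ e := by omega
    obtain ⟨eN, rfl⟩ := Int.eq_ofNat_of_zero_le he0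
    have h2 : 2 ≤ eN := by exact_mod_cast he1
    have hsq : eN * eN ≤ lst.length := by exact_mod_cast he2
    have hdvd : eN ∣ lst.length := by
      have := (PySem.Int.mod_eq_zero_iff_dvd (lst.length : Int) (eN : Int)).mp he3
      exact_mod_cast this
    have heL : eN ≤ lst.length := le_trans (Nat.le_mul_of_pos_left eN (by omega)) hsq
    have hq2 : eN ≤ lst.length / eN := (Nat.le_div_iff_mul_le (by omega)).mpr hsq
    have hqL : lst.length / eN ≤ lst.length := Nat.div_le_self _ _
    refine ⟨eN, h2, hsq, hdvd, ?_⟩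
    rcases he4 with hL | hR
    · exact Or.inl ((periodic_iff lst eN (by omega) heL).mp hL)
    · rw [PySem.Int.floordiv_natCast] at hR
      exact Or.inr ((periodic_iff lst (lst.length / eN) (by omega) hqL).mp hR)
  · rintro ⟨eN, h2, hsq, hdvd, hper⟩
    have heL : eN ≤ lst.length := le_trans (Nat.le_mul_of_pos_left eN (by omega)) hsq
    have hq2 : eN ≤ lst.length / eN := (Nat.le_div_iff_mul_le (by omega)).mpr hsq
    have hqL : lst.length / eN ≤ lst.length := Nat.div_le_self _ _
    refine ⟨(eN : Int), by exact_mod_cast h2, by exact_mod_cast hsq, ?_, ?_⟩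
    · exact (PySem.Int.mod_eq_zero_iff_dvd _ _).mpr (by exact_mod_cast hdvd)
    · rcases hper with hL | hR
      · exact Or.inl ((periodic_iff lst eN (by omega) heL).mpr hL)
      · right
        rw [PySem.Int.floordiv_natCast]
        exact (periodic_iff lst (lst.length / eN) (by omega) hqL).mpr hR

lemma spec_bridge (lst : List Int) : ASpec lst ↔ BSpec lst := by
  constructor
  · rintro ⟨k, hk2, hkn, hdvd, hper⟩
    obtain ⟨m, hm⟩ := hdvd
    have hm2 : 2 ≤ m := by
      rcases Nat.lt_or_ge m 2 with hc | hc
      · interval_cases m <;> omega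
      · exact hc
    by_cases hsq : k * k ≤ lst.length
    · exact ⟨k, hk2, hsq, ⟨m, hm⟩, Or.inl hper⟩
    · have hmk : m ≤ k := by
        rcases Nat.lt_or_ge k m with hc | hc
        swap
        · exact hc
        have h1 : k * (k + 1) ≤ k * m := Nat.mul_le_mul_left k hc
        have h2 : k * k ≤ k * (k + 1) := Nat.mul_le_mul_left k (by omega)
        omega
      have hmm : m * m ≤ lst.length := by
        have : m * m ≤ k * m := Nat.mul_le_mul_right m hmk
        omega
      refine ⟨m, hm2, hmm, ⟨k, by rw [hm, Nat.mul_comm]⟩, Or.inr ?_⟩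
      have hq : lst.length / m = k := by
        rw [hm]
        exact Nat.mul_div_cancel k (by omega)
      rwa [hq]
  · rintro ⟨e, he2, hsq, hdvd, hper⟩
    obtain ⟨m, hm⟩ := hdvd
    have h4 : 2 * 2 ≤ e * e := Nat.mul_le_mul he2 he2
    have hem : e ≤ m := Nat.le_of_mul_le_mul_left (by rw [← hm]; exact hsq) (by omega)
    have h2e : e * 2 ≤ e * e := Nat.mul_le_mul_left e he2
    rcases hper with hL | hR
    · exact ⟨e, he2, by omega, ⟨m, hm⟩, hL⟩
    · have h2m : 2 * m ≤ e * m := Nat.mul_le_mul_right m he2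
      have hq : lst.length / e = m := by
        rw [hm]
        exact Nat.mul_div_cancel_left m (by omega)
      rw [hq] at hR
      exact ⟨m, by omega, by omega, ⟨e, by rw [hm, Nat.mul_comm]⟩, hR⟩

-- ===== VERDICT (by name: the statement is the Claim_ definition above) =====
theorem complete_bracelet_spec : Claim_equal_complete_bracelet := by
  intro lst _
  unfold Spec_complete_bracelet
  have := (A_iff lst).trans ((spec_bridge lst).trans (B_iff lst).symm)
  cases h1 : complete_bracelet lst <;> cases h2 : complete_bracelet_alt lst <;>
    simp_all
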